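-- pv_equiv track=rewrite | github.com/hhtomaswt11/PL2025-A104529 | TPC2/ex3_dict_periodo_titulos_obras.py | dict_periodo_titulos
-- ===== SOURCE A (Python) =====
-- def dict_periodo_titulos(data):
--     dic = dict()
--     for l in data:
--         periodo = l[3]
--         titulo = l[0]
--         if periodo not in dic:
--             dic[periodo] = list() # Criámos uma lista associada ao período caso este ainda não este presente no dict
--
--         dic[periodo].append(titulo) # Adicionamos o título à lista associada ao período
--     return dic
-- ===== SOURCE B (Python) =====
-- def dict_periodo_titulos(data):
--     # Alternative decomposition: list the periods in first-appearance order,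
--     # then build each period's title list with one filtering pass per period.
--     periods = list(dict.fromkeys(l[3] for l in data))
--     return {p: [l[0] for l in data if l[3] == p] for p in periods}
-- ===== Notes on version B (the rewrite author's own statement) =====
-- stated objective: alternative
-- what changed: Replaces the single-pass dict-accumulation with a two-phase plan: dedup the period column in first-appearance order, then build each period's title list by filtering the rows, so no mutable dict is threaded through the loop.
import Mathlib
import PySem

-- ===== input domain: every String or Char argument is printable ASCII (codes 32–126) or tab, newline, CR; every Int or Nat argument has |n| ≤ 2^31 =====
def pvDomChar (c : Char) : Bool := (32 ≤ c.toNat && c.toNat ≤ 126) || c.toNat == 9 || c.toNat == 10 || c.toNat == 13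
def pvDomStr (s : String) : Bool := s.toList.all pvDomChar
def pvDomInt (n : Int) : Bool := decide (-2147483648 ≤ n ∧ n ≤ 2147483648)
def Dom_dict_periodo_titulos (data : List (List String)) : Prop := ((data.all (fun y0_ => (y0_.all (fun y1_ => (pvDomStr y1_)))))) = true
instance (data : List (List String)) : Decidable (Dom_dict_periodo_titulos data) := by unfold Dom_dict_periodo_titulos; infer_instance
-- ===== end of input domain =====

-- B groups titles by period via a dedup of the period column followed by one filter per period,
-- instead of A's single pass threading a mutable dict; return values agree on Pre_ (rows of length ≥ 4).

-- ===== PORT A =====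
def dict_periodo_titulos (data : List (List String)) : List (String × List String) :=
  (data.foldl (fun dic l =>
      -- l[3] / l[0]; the IndexError case (rows shorter than 4) is excluded by Pre_
      let periodo := (PySem.List.pyGet? l 3).getD ""
      let titulo := (PySem.List.pyGet? l 0).getD ""
      let dic := if dic.contains periodo then dic else dic.insert periodo ([] : List String)
      dic.modify periodo [] (fun ts => ts ++ [titulo]))
    PySem.Dict.empty).items

-- ===== PORT B =====
def dict_periodo_titulos_alt (data : List (List String)) : List (String × List String) :=
  let periods := PySem.List.dedup (data.map (fun l => (PySem.List.pyGet? l 3).getD ""))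
  periods.map (fun p =>
    (p, (data.filter (fun l => (PySem.List.pyGet? l 3).getD "" == p)).map
          (fun l => (PySem.List.pyGet? l 0).getD "")))

-- ===== PRECONDITION & SPEC =====
-- Pre_ excludes exactly the inputs on which Python A raises IndexError: a row with fewer than 4 fields.
def Pre_dict_periodo_titulos (data : List (List String)) : Prop := ∀ l ∈ data, 4 ≤ l.length
instance (data : List (List String)) : Decidable (Pre_dict_periodo_titulos data) := by
  unfold Pre_dict_periodo_titulos; infer_instance
def pvWitness_dict_periodo_titulos : List (List String) :=
  [["Os Maias", "Eca", "1888", "Realismo"], ["Amor de Perdicao", "Camilo", "1862", "Romantismo"]]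
def Spec_dict_periodo_titulos (data : List (List String)) (out : List (String × List String)) : Prop := out = dict_periodo_titulos_alt data
instance (data : List (List String)) (out : List (String × List String)) : Decidable (Spec_dict_periodo_titulos data out) := by unfold Spec_dict_periodo_titulos; infer_instance

-- ===== CLAIM (what is proved, stated in full; the proofs are below) =====
def Claim_equal_dict_periodo_titulos : Prop := ∀ (data : List (List String)), Dom_dict_periodo_titulos data → Pre_dict_periodo_titulos data → Spec_dict_periodo_titulos data (dict_periodo_titulos data)

-- ===== LEMMAS AND PROOFS =====

-- A's 'if periodo not in dic: dic[periodo] = []' followed by an append is one 'modify' with default [].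
theorem step_eq_modify {ν : Type} (d : PySem.Dict String ν) (p : String) (v : ν) (f : ν → ν) :
    (if d.contains p then d else d.insert p v).modify p v f = d.modify p v f := by
  by_cases h : d.contains p = true
  · simp [h]
  · simp only [h, Bool.false_eq_true, if_false]
    simp [PySem.Dict.modify, PySem.Dict.getD_insert_self, PySem.Dict.insert_insert_self]
    rw [PySem.Dict.getD_of_not_contains (h := by simpa using h)]

theorem dict_periodo_titulos_spec : Claim_equal_dict_periodo_titulos := by
  intro data _ _
  unfold Spec_dict_periodo_titulos dict_periodo_titulos dict_periodo_titulos_alt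
  -- fold A as one modify-per-row over the (period, title) pairs
  have hfold :
      data.foldl (fun dic l =>
        let periodo := (PySem.List.pyGet? l 3).getD ""
        let titulo := (PySem.List.pyGet? l 0).getD ""
        let dic := if dic.contains periodo then dic else dic.insert periodo ([] : List String)
        dic.modify periodo [] (fun ts => ts ++ [titulo])) PySem.Dict.empty
      = (data.map (fun l => ((PySem.List.pyGet? l 3).getD "", (PySem.List.pyGet? l 0).getD ""))).foldl
          (fun d p => d.modify p.1 [] (fun ts => ts ++ [p.2])) PySem.Dict.empty := by
    rw [List.foldl_map]
    apply PySem.List.foldl_congr_mem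
    intro acc x _
    exact step_eq_modify ..
  rw [hfold]
  have hnd := PySem.Dict.nodup_keys_foldl_modify_key
    (data.map (fun l => ((PySem.List.pyGet? l 3).getD "", (PySem.List.pyGet? l 0).getD "")))
    Prod.fst [] (fun _ p => fun ts => ts ++ [p.2]) PySem.Dict.empty (by simp)
  rw [PySem.Dict.items_eq_map_keys _ hnd []]
  rw [PySem.Dict.keys_foldl_modify_key]
  simp only [PySem.Dict.keys_empty, List.map_map]
  apply List.map_congr_left
  intro k _
  rw [PySem.Dict.getD_foldl_modify_append]
  simp [List.filter_map, List.map_map, Function.comp_def]
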